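-- pv_equiv track=rewrite | github.com/PearlCoastal/Leetcode_Solutions_python3 | DynamicProcessing/1713.py | minOperations
-- ===== SOURCE A (Python) =====
-- import bisect
--
-- def minOperations(target: [int], arr: [int]) -> int:
--
--     m, n = len(target), len(arr)
--     dic = {}
--     for i, num in enumerate(target):
--         dic[num] = i
--     LIS = []
--     for num in arr:
--         if num in dic:
--             if not LIS or LIS[-1] < dic[num]:
--                 LIS.append(dic[num])
--             else:
--                 i = bisect.bisect_left(LIS, dic[num])
--                 LIS[i] = dic[num]
--     return m - len(LIS)
--
-- target = [6,4,8,1,3,2]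
--
-- arr = [4,7,6,2,3,8,6,1]
-- ===== SOURCE B (Python) =====
-- def minOperations(target: [int], arr: [int]) -> int:
--     dic = {num: i for i, num in enumerate(target)}
--     mapped = [dic[num] for num in arr if num in dic]
--     # quadratic LIS DP: dp holds (value, length of longest increasing subseq ending there)
--     dp = []
--     for x in mapped:
--         best = 0
--         for v, d in dp:
--             if v < x and best < d:
--                 best = d
--         dp.append((x, best + 1))
--     longest = 0
--     for v, d in dp:
--         if longest < d:
--             longest = d
--     return len(target) - longest
-- ===== Notes on version B (the rewrite author's own statement) =====
-- stated objective: alternative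
-- what changed: Replaces patience sorting with binary search (bisect_left tail replacement) by a classic quadratic dynamic program that stores, for each kept element, the length of the longest strictly increasing subsequence ending there, and returns len(target) minus the maximum of those lengths.
import Mathlib
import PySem

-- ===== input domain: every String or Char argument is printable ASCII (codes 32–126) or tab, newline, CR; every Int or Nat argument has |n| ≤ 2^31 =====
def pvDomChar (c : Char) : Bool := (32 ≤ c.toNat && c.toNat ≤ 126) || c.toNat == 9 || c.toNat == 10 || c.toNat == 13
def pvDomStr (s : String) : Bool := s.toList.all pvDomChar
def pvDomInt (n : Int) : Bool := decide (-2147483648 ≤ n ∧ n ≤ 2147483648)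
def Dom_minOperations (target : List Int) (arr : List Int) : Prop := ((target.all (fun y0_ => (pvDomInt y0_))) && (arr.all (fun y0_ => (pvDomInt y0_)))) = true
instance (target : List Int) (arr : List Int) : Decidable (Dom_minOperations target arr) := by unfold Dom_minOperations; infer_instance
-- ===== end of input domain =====

-- B replaces A's patience-sorting LIS (bisect_left tail replacement) by a quadratic
-- longest-increasing-subsequence dynamic program; same return value, no speed claim.


-- ===== PORT A =====
-- body of A's 'for num in arr' loop (after the 'num in dic' lookup has produced v = dic[num])
def pstep (L : List Int) (v : Int) : List Int :=
  if L = [] ∨ PySem.List.pyGetD L (-1) 0 < v then L ++ [v]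
  else PySem.List.pySetD L (PySem.List.bisectLeft L v : Int) v

def minOperations (target : List Int) (arr : List Int) : Int :=
  let m : Int := (target.length : Int)
  let dic : PySem.Dict Int Int :=
    (PySem.List.enumerate target).foldl (fun d p => d.insert p.2 p.1) PySem.Dict.empty
  let LIS : List Int := arr.foldl (fun L num =>
    match dic.get? num with
    | none => L
    | some v => pstep L v) []
  m - (LIS.length : Int)

-- ===== PORT B =====
-- body of B's dp loop: append (x, 1 + best dp value among earlier smaller kept values)
def bstep (dp : List (Int × Nat)) (x : Int) : List (Int × Nat) :=
  dp ++ [(x, (dp.foldl (fun best q => if q.1 < x ∧ best < q.2 then q.2 else best) 0) + 1)]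

def minOperations_alt (target : List Int) (arr : List Int) : Int :=
  let dic : PySem.Dict Int Int :=
    (PySem.List.enumerate target).foldl (fun d p => d.insert p.2 p.1) PySem.Dict.empty
  let mapped : List Int := arr.filterMap (fun num => dic.get? num)
  let dp : List (Int × Nat) := mapped.foldl bstep []
  let longest : Nat := dp.foldl (fun best q => if best < q.2 then q.2 else best) 0
  (target.length : Int) - (longest : Int)

-- ===== PRECONDITION & SPEC =====
def Spec_minOperations (target : List Int) (arr : List Int) (out : Int) : Prop := out = minOperations_alt target arr
instance (target : List Int) (arr : List Int) (out : Int) : Decidable (Spec_minOperations target arr out) := by unfold Spec_minOperations; infer_instance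

-- ===== CLAIM (what is proved, stated in full; the proofs are below) =====
def Claim_equal_minOperations : Prop := ∀ (target : List Int) (arr : List Int), Dom_minOperations target arr → Spec_minOperations target arr (minOperations target arr)

-- ===== LEMMAS AND PROOFS =====

-- The invariant connecting A's pile-tails list L with B's dp table D over the same processed prefix:
-- L is strictly increasing; L[j] is a tail value realising dp ≥ j+1 and is minimal among them;
-- every dp value is ≤ |L|; and |L| itself is realised by some dp entry (unless L is empty).
def InvLD (D : List (Int × Nat)) (L : List Int) : Prop :=
  L.Pairwise (· < ·) ∧
  (∀ j (hj : j < L.length), ∃ q ∈ D, j + 1 ≤ q.2 ∧ q.1 = L[j]) ∧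
  (∀ j (hj : j < L.length), ∀ q ∈ D, j + 1 ≤ q.2 → L[j] ≤ q.1) ∧
  (∀ q ∈ D, q.2 ≤ L.length) ∧
  (L = [] ∨ ∃ q ∈ D, q.2 = L.length)

theorem bestOf_aux (x : Int) (D : List (Int × Nat)) : ∀ (init : Nat),
    init ≤ D.foldl (fun best q => if q.1 < x ∧ best < q.2 then q.2 else best) init ∧
    (D.foldl (fun best q => if q.1 < x ∧ best < q.2 then q.2 else best) init = init ∨
      ∃ q ∈ D, q.1 < x ∧ q.2 = D.foldl (fun best q => if q.1 < x ∧ best < q.2 then q.2 else best) init) ∧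
    (∀ q ∈ D, q.1 < x → q.2 ≤ D.foldl (fun best q => if q.1 < x ∧ best < q.2 then q.2 else best) init) := by
  induction D with
  | nil => intro init; refine ⟨le_refl _, Or.inl rfl, by simp⟩
  | cons q D ih =>
    intro init
    simp only [List.foldl_cons]
    rcases ih (if q.1 < x ∧ init < q.2 then q.2 else init) with ⟨h1, h2, h3⟩
    by_cases hc : q.1 < x ∧ init < q.2
    · rw [if_pos hc] at h1 h2 h3 ⊢
      have hiq : init ≤ q.2 := le_of_lt hc.2
      refine ⟨hiq.trans h1, ?_, ?_⟩
      · rcases h2 with h2 | ⟨r, hr, hrx, hre⟩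
        · exact Or.inr ⟨q, by simp, hc.1, h2.symm⟩
        · exact Or.inr ⟨r, by simp [hr], hrx, hre⟩
      · intro r hr hrx
        rcases List.mem_cons.mp hr with h | h
        · subst h; exact h1
        · exact h3 r h hrx
    · rw [if_neg hc] at h1 h2 h3 ⊢
      refine ⟨h1, ?_, ?_⟩
      · rcases h2 with h2 | ⟨r, hr, hrx, hre⟩
        · exact Or.inl h2
        · exact Or.inr ⟨r, by simp [hr], hrx, hre⟩
      · intro r hr hrx
        rcases List.mem_cons.mp hr with h | h
        · subst h
          have : ¬ init < r.2 := fun hlt => hc ⟨hrx, hlt⟩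
          exact le_trans (Nat.le_of_not_lt this) h1
        · exact h3 r h hrx

theorem maxOf_aux (D : List (Int × Nat)) : ∀ (init : Nat),
    init ≤ D.foldl (fun best q => if best < q.2 then q.2 else best) init ∧
    (D.foldl (fun best q => if best < q.2 then q.2 else best) init = init ∨
      ∃ q ∈ D, q.2 = D.foldl (fun best q => if best < q.2 then q.2 else best) init) ∧
    (∀ q ∈ D, q.2 ≤ D.foldl (fun best q => if best < q.2 then q.2 else best) init) := by
  induction D with
  | nil => intro init; exact ⟨le_refl _, Or.inl rfl, by simp⟩
  | cons q D ih =>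
    intro init
    simp only [List.foldl_cons]
    rcases ih (if init < q.2 then q.2 else init) with ⟨h1, h2, h3⟩
    by_cases hc : init < q.2
    · rw [if_pos hc] at h1 h2 h3 ⊢
      have hiq : init ≤ q.2 := le_of_lt hc
      refine ⟨hiq.trans h1, ?_, ?_⟩
      · rcases h2 with h2 | ⟨r, hr, hre⟩
        · exact Or.inr ⟨q, by simp, h2.symm⟩
        · exact Or.inr ⟨r, by simp [hr], hre⟩
      · intro r hr
        rcases List.mem_cons.mp hr with h | h
        · subst h; exact h1
        · exact h3 r h
    · rw [if_neg hc] at h1 h2 h3 ⊢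
      refine ⟨h1, ?_, ?_⟩
      · rcases h2 with h2 | ⟨r, hr, hre⟩
        · exact Or.inl h2
        · exact Or.inr ⟨r, by simp [hr], hre⟩
      · intro r hr
        rcases List.mem_cons.mp hr with h | h
        · subst h; exact le_trans (Nat.le_of_not_lt hc) h1
        · exact h3 r h

-- In the append branch every element of L is < v.
theorem all_lt_of_append_branch (L : List Int) (v : Int)
    (hp : L.Pairwise (· < ·)) (hbr : L = [] ∨ PySem.List.pyGetD L (-1) 0 < v) :
    ∀ j (hj : j < L.length), L[j] < v := by
  intro j hj
  rcases hbr with h | h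
  · subst h; simp at hj
  · have hne : L ≠ [] := by intro h0; subst h0; simp at hj
    rw [PySem.List.pyGetD_neg_one L 0 hne] at h
    have hlast : L.getLast hne = L[L.length - 1] := List.getLast_eq_getElem hne
    rcases Nat.lt_or_ge j (L.length - 1) with hlt | hge
    · have hstep : L[j] < L[L.length - 1] :=
        (List.pairwise_iff_getElem.mp hp) j (L.length - 1) (by omega) (by omega) hlt
      have hv : L[L.length - 1] < v := by rw [← hlast]; exact h
      exact lt_trans hstep hv
    · have : j = L.length - 1 := by omega
      subst this; rw [← hlast]; exact h

-- One step of both loops preserves the invariant.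
theorem inv_step (D : List (Int × Nat)) (L : List Int) (x : Int)
    (h : InvLD D L) : InvLD (bstep D x) (pstep L x) := by
  obtain ⟨hpw, hex, hmin, hbd, hwit⟩ := h
  set b := D.foldl (fun best q => if q.1 < x ∧ best < q.2 then q.2 else best) 0 with hb
  obtain ⟨-, hb2, hb3⟩ := bestOf_aux x D 0
  by_cases hbr : L = [] ∨ PySem.List.pyGetD L (-1) 0 < x
  · -- append branch: every element of L is < x, and b = L.length
    have hall : ∀ j (hj : j < L.length), L[j] < x := all_lt_of_append_branch L x hpw hbr
    have hble : b ≤ L.length := by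
      rcases hb2 with h0 | ⟨q, hq, -, hqe⟩
      · rw [← hb] at h0; omega
      · rw [← hb] at hqe; rw [← hqe]; exact hbd q hq
    have hbge : L.length ≤ b := by
      rcases Nat.eq_zero_or_pos L.length with h0 | h0
      · omega
      · obtain ⟨q, hq, hq2, hq1⟩ := hex (L.length - 1) (by omega)
        have : q.2 ≤ b := hb3 q hq (by rw [hq1]; exact hall _ (by omega))
        omega
    have hbeq : b = L.length := le_antisymm hble hbge
    have hstep : pstep L x = L ++ [x] := by rw [pstep, if_pos hbr]
    have hD' : bstep D x = D ++ [(x, L.length + 1)] := by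
      rw [bstep, ← hb, hbeq]
    rw [hstep, hD']
    refine ⟨?_, ?_, ?_, ?_, ?_⟩
    · rw [List.pairwise_append]
      refine ⟨hpw, List.pairwise_singleton _ _, ?_⟩
      intro a ha y hy
      rw [List.mem_singleton] at hy; subst hy
      obtain ⟨j, hj, he⟩ := List.mem_iff_getElem.mp ha
      rw [← he]; exact hall j hj
    · intro j hj
      simp only [List.length_append, List.length_singleton] at hj
      rcases Nat.lt_or_ge j L.length with hlt | hge
      · obtain ⟨q, hq, hq2, hq1⟩ := hex j hlt
        exact ⟨q, List.mem_append_left _ hq, hq2, by rw [hq1, List.getElem_append_left hlt]⟩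
      · have hj' : j = L.length := by omega
        subst hj'
        refine ⟨(x, L.length + 1), List.mem_append_right _ (by simp), le_refl _, ?_⟩
        simp
    · intro j hj q hq hq2
      simp only [List.length_append, List.length_singleton] at hj
      rcases List.mem_append.mp hq with hql | hqr
      · rcases Nat.lt_or_ge j L.length with hlt | hge
        · rw [List.getElem_append_left hlt]; exact hmin j hlt q hql hq2
        · have : q.2 ≤ L.length := hbd q hql
          omega
      · rw [List.mem_singleton] at hqr; subst hqr
        simp only
        rcases Nat.lt_or_ge j L.length with hlt | hge
        · rw [List.getElem_append_left hlt]
          exact le_of_lt (hall j hlt)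
        · have hj' : j = L.length := by omega
          subst hj'
          rw [List.getElem_append_right (le_refl _)]
          simp
    · intro q hq
      rcases List.mem_append.mp hq with h | h
      · have := hbd q h; simp; omega
      · rw [List.mem_singleton] at h; subst h; simp
    · refine Or.inr ⟨(x, L.length + 1), List.mem_append_right _ (by simp), by simp⟩
  · -- replacement branch
    have hne : L ≠ [] := by intro h0; exact hbr (Or.inl h0)
    set c := PySem.List.bisectLeft L x with hc
    obtain ⟨hc1, hc2, hc3⟩ := PySem.List.bisectLeft_spec L x (hpw.imp le_of_lt)
    rw [← hc] at hc1 hc2 hc3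
    have hclt : c < L.length := by
      rcases Nat.lt_or_ge c L.length with h0 | h0
      · exact h0
      · exfalso
        have hlen : 0 < L.length := List.length_pos_of_ne_nil hne
        have hlast : L[L.length - 1] < x := hc2 (L.length - 1) (by omega) (by omega)
        refine hbr (Or.inr ?_)
        rw [PySem.List.pyGetD_neg_one L 0 hne, List.getLast_eq_getElem hne]
        exact hlast
    have hxc : x ≤ L[c] := hc3 c hclt (le_refl _)
    -- b = c
    have hbge : c ≤ b := by
      rcases Nat.eq_zero_or_pos c with h0 | h0
      · omega
      · obtain ⟨q, hq, hq2, hq1⟩ := hex (c - 1) (by omega)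
        have : q.2 ≤ b := hb3 q hq (by rw [hq1]; exact hc2 (c-1) (by omega) (by omega))
        omega
    have hble : b ≤ c := by
      rcases hb2 with h0 | ⟨q, hq, hqx, hqe⟩
      · rw [← hb] at h0; omega
      · rw [← hb] at hqe
        by_contra hgt
        have hq2 : q.2 ≤ L.length := hbd q hq
        have hidx : b - 1 < L.length := by omega
        have h1 : L[b-1] ≤ q.1 := hmin (b-1) hidx q hq (by omega)
        have h2 : x ≤ L[b-1] := hc3 (b-1) hidx (by omega)
        omega
    have hbeq : b = c := le_antisymm hble hbge
    have hstep : pstep L x = L.set c x := by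
      rw [pstep, if_neg hbr, ← hc, PySem.List.pySetD_natCast]
    have hD' : bstep D x = D ++ [(x, c + 1)] := by rw [bstep, ← hb, hbeq]
    have hlen' : (L.set c x).length = L.length := List.length_set ..
    rw [hstep, hD']
    refine ⟨?_, ?_, ?_, ?_, ?_⟩
    · rw [List.pairwise_iff_getElem]
      intro i j hi hj hij
      have hi' : i < L.length := by rw [List.length_set] at hi; exact hi
      have hj' : j < L.length := by rw [List.length_set] at hj; exact hj
      have hpij := List.pairwise_iff_getElem.mp hpw
      rw [List.getElem_set hi, List.getElem_set hj]
      by_cases hic : c = i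
      · rw [if_pos hic, if_neg (by omega)]
        have h2 : L[i]'hi' < L[j]'hj' := hpij i j hi' hj' hij
        have h3 : x ≤ L[i]'hi' := le_of_le_of_eq hxc (getElem_congr rfl hic hclt)
        exact lt_of_le_of_lt h3 h2
      · by_cases hjc : c = j
        · rw [if_neg hic, if_pos hjc]
          have : L[i]'hi' < x := hc2 i hi' (by omega)
          exact this
        · rw [if_neg hic, if_neg hjc]
          exact hpij i j hi' hj' hij
    · intro j hj
      rw [hlen'] at hj
      by_cases hjc : j = c
      · subst hjc
        refine ⟨(x, c + 1), List.mem_append_right _ (by simp), le_refl _, ?_⟩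
        simp only
        rw [List.getElem_set_self (by omega)]
      · obtain ⟨q, hq, hq2, hq1⟩ := hex j hj
        refine ⟨q, List.mem_append_left _ hq, hq2, ?_⟩
        rw [hq1, List.getElem_set_ne (by omega)]
    · intro j hj q hq hq2
      rw [hlen'] at hj
      rcases List.mem_append.mp hq with hql | hqr
      · by_cases hjc : j = c
        · subst hjc
          rw [List.getElem_set_self (by omega)]
          calc x ≤ L[c] := hxc
            _ ≤ q.1 := hmin c hclt q hql hq2
        · rw [List.getElem_set_ne (by omega)]
          exact hmin j hj q hql hq2
      · rw [List.mem_singleton] at hqr; subst hqr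
        simp only at hq2 ⊢
        have hjle : j ≤ c := by omega
        by_cases hjc : j = c
        · subst hjc; rw [List.getElem_set_self (by omega)]
        · rw [List.getElem_set_ne (by omega)]
          exact le_of_lt (hc2 j hj (by omega))
    · intro q hq
      rw [hlen']
      rcases List.mem_append.mp hq with h | h
      · exact hbd q h
      · rw [List.mem_singleton] at h; subst h
        simp only; omega
    · rcases hwit with h | ⟨q, hq, hqe⟩
      · exact absurd h hne
      · exact Or.inr ⟨q, List.mem_append_left _ hq, by rw [hlen', hqe]⟩

-- The invariant holds for every processed prefix.
theorem inv_foldl (p : List Int) : InvLD (p.foldl bstep []) (p.foldl pstep []) := by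
  induction p using List.reverseRecOn with
  | nil =>
    refine ⟨List.Pairwise.nil, ?_, ?_, ?_, Or.inl rfl⟩ <;> simp
  | append_singleton p x ih =>
    rw [List.foldl_append, List.foldl_append]
    simp only [List.foldl_cons, List.foldl_nil]
    exact inv_step _ _ x ih

-- |L| equals the maximum dp value.
theorem len_eq_maxOf (p : List Int) :
    (p.foldl pstep []).length =
      (p.foldl bstep []).foldl (fun best q => if best < q.2 then q.2 else best) 0 := by
  obtain ⟨-, -, -, hbd, hwit⟩ := inv_foldl p
  obtain ⟨-, hm2, hm3⟩ := maxOf_aux (p.foldl bstep []) 0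
  set M := (p.foldl bstep []).foldl (fun best q => if best < q.2 then q.2 else best) 0 with hM
  have hle : M ≤ (p.foldl pstep []).length := by
    rcases hm2 with h0 | ⟨q, hq, hqe⟩
    · omega
    · rw [← hqe]; exact hbd q hq
  have hge : (p.foldl pstep []).length ≤ M := by
    rcases hwit with h | ⟨q, hq, hqe⟩
    · rw [h]; simp
    · rw [← hqe]; exact hm3 q hq
  omega

-- A's loop over arr, skipping numbers absent from dic, is the pstep fold over the filtered list.
theorem foldl_skip (dic : PySem.Dict Int Int) (arr : List Int) : ∀ (L : List Int),
    arr.foldl (fun L num => match dic.get? num with | none => L | some v => pstep L v) L =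
      (arr.filterMap (fun num => dic.get? num)).foldl pstep L := by
  induction arr with
  | nil => intro L; rfl
  | cons a arr ih =>
    intro L
    rw [List.foldl_cons, List.filterMap_cons]
    cases h : dic.get? a with
    | none => simpa [h] using ih L
    | some v => simpa [h] using ih (pstep L v)

-- ===== VERDICT (by name: the statement is the Claim_ definition above) =====
theorem minOperations_spec : Claim_equal_minOperations := by
  intro target arr _
  unfold Spec_minOperations minOperations minOperations_alt
  simp only
  rw [foldl_skip, len_eq_maxOf]
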